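-- pv_equiv track=rewrite | github.com/paxxxw/litematic-converter | litematic_to_bp_converter.py | pack_data_array
-- ===== SOURCE A (Python) =====
-- def pack_data_array(data, palette_size):
--     bits_per_block = max(4, (palette_size - 1).bit_length())
--     blocks_per_long = 64 // bits_per_block
--     num_longs = (4096 + blocks_per_long - 1) // blocks_per_long
--     packed_data = [0] * num_longs
--     for i, block_id in enumerate(data):
--         long_index = i // blocks_per_long
--         bit_offset = i % blocks_per_long * bits_per_block
--         packed_data[long_index] |= block_id << bit_offset
--     for i in range(len(packed_data)):
--         if packed_data[i] >= 2 ** 63: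
--             packed_data[i] -= 2 ** 64
--     return packed_data
-- ===== SOURCE B (Python) =====
-- def pack_data_array(data, palette_size):
--     bits_per_block = max(4, (palette_size - 1).bit_length())
--     blocks_per_long = 64 // bits_per_block
--     num_longs = (4096 + blocks_per_long - 1) // blocks_per_long
--     packed = []
--     for start in range(0, len(data), blocks_per_long):
--         value = 0
--         for j, block_id in enumerate(data[start:start + blocks_per_long]):
--             value |= block_id << (j * bits_per_block)
--         packed.append(value - 2 ** 64 if value >= 2 ** 63 else value)
--     packed.extend([0] * (num_longs - len(packed)))
--     return packed
-- ===== Notes on version B (the rewrite author's own statement) =====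
-- stated objective: alternative
-- what changed: Replaces A's flat scatter (per-element i//blocks_per_long, i%blocks_per_long index arithmetic into a preallocated array followed by a separate two's-complement fixup pass) with a grouped traversal that walks data in consecutive blocks_per_long-sized chunks, builds each 64-bit long directly from its chunk with an inner shift-or loop, fixes its sign inline, and pads the result with zeros.
import Mathlib
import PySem

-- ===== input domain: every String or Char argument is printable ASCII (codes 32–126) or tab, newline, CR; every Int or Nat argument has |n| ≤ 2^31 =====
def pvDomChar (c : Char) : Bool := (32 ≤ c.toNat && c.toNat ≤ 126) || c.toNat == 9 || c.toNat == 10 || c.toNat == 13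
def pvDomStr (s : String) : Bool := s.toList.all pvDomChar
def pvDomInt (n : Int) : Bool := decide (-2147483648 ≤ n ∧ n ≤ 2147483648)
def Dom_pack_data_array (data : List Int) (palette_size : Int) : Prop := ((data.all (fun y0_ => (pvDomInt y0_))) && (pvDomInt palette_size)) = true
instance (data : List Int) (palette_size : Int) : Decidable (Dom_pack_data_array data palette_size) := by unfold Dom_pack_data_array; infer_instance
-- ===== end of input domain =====

-- B replaces A's flat scatter (i // blocks_per_long, i % blocks_per_long into a preallocated
-- array, then a separate sign-fixup pass) by a grouped traversal: it walks data in consecutive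
-- chunks of blocks_per_long, builds each 64-bit long directly from its chunk, fixes its sign
-- inline and pads with zeros — objective: alternative decomposition, same asymptotic cost.

-- ===== PORT A =====
-- the enumerate loop: packed_data[long_index] |= block_id << bit_offset
-- (enumerate index i, blocks_per_long, long lengths are nonnegative Python ints, kept as Nat)
def packLoopA (bpb bpl : Nat) (i : Nat) (packed : List Int) : List Int → List Int
  | [] => packed
  | x :: xs =>
      packLoopA bpb bpl (i + 1)
        (packed.set (i / bpl) (PySem.Int.bor (packed.getD (i / bpl) 0) (x <<< (i % bpl * bpb)))) xs

def pack_data_array (data : List Int) (palette_size : Int) : List Int :=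
  let bits_per_block := max 4 (PySem.Int.bitLength (palette_size - 1))
  let blocks_per_long := 64 / bits_per_block
  let num_longs := (4096 + blocks_per_long - 1) / blocks_per_long
  let packed_data := packLoopA bits_per_block blocks_per_long 0
    (List.replicate num_longs (0 : Int)) data
  -- second loop: in-place two's-complement fixup over range(len(packed_data)), as a map
  packed_data.map (fun v => if v ≥ 2 ^ 63 then v - 2 ^ 64 else v)

-- ===== PORT B =====
-- inner loop: value |= block_id << (j * bits_per_block) over one chunk
def orChunk (bpb : Nat) (j : Nat) (value : Int) : List Int → Int
  | [] => value
  | x :: xs => orChunk bpb (j + 1) (PySem.Int.bor value (x <<< (j * bpb))) xs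

-- outer loop over range(0, len(data), blocks_per_long): slice a chunk, pack it, fix sign inline
def chunksB (bpb bpl : Nat) : List Int → List Int
  | [] => []
  | x :: xs =>
      let value := orChunk bpb 0 0 (x :: xs.take (bpl - 1))
      (if value ≥ 2 ^ 63 then value - 2 ^ 64 else value) :: chunksB bpb bpl (xs.drop (bpl - 1))
  termination_by data => data.length
  decreasing_by simp

def pack_data_array_alt (data : List Int) (palette_size : Int) : List Int :=
  let bits_per_block := max 4 (PySem.Int.bitLength (palette_size - 1))
  let blocks_per_long := 64 / bits_per_block
  let num_longs := (4096 + blocks_per_long - 1) / blocks_per_long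
  let packed := chunksB bits_per_block blocks_per_long data
  packed ++ List.replicate (num_longs - packed.length) (0 : Int)

-- ===== PRECONDITION & SPEC =====
-- Pre_ excludes exactly the over-long inputs (more blocks than the 4096-block array holds),
-- on which A's packed_data[long_index] raises IndexError.
def Pre_pack_data_array (data : List Int) (palette_size : Int) : Prop :=
  data.length ≤ ((4096 + 64 / max 4 (PySem.Int.bitLength (palette_size - 1)) - 1) /
      (64 / max 4 (PySem.Int.bitLength (palette_size - 1)))) *
    (64 / max 4 (PySem.Int.bitLength (palette_size - 1)))
instance (data : List Int) (palette_size : Int) : Decidable (Pre_pack_data_array data palette_size) := by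
  unfold Pre_pack_data_array; infer_instance

def pvWitness_pack_data_array : List Int × Int := ([3, 0, 7, 1, 2], 13)

def Spec_pack_data_array (data : List Int) (palette_size : Int) (out : List Int) : Prop := out = pack_data_array_alt data palette_size
instance (data : List Int) (palette_size : Int) (out : List Int) : Decidable (Spec_pack_data_array data palette_size out) := by unfold Spec_pack_data_array; infer_instance

-- ===== CLAIM (what is proved, stated in full; the proofs are below) =====
def Claim_equal_pack_data_array : Prop := ∀ (data : List Int) (palette_size : Int), Dom_pack_data_array data palette_size → Pre_pack_data_array data palette_size → Spec_pack_data_array data palette_size (pack_data_array data palette_size)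

-- ===== LEMMAS AND PROOFS =====

theorem pv_witness_ok :
    Dom_pack_data_array pvWitness_pack_data_array.1 pvWitness_pack_data_array.2 ∧
    Pre_pack_data_array pvWitness_pack_data_array.1 pvWitness_pack_data_array.2 := by
  decide

-- A's loop over a list split at a chunk boundary
theorem packLoopA_append (bpb bpl : Nat) (u v : List Int) :
    ∀ (i : Nat) (p : List Int),
      packLoopA bpb bpl i p (u ++ v)
        = packLoopA bpb bpl (i + u.length) (packLoopA bpb bpl i p u) v := by
  induction u with
  | nil => intro i p; simp [packLoopA]
  | cons x xs ih =>
      intro i p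
      simp only [List.cons_append, packLoopA, ih, List.length_cons]
      ring_nf

-- inside one chunk (k + |chunk| ≤ bpl) A only rewrites the head cell, OR-folding just like B
theorem packLoopA_chunk (bpb bpl : Nat) (chunk : List Int) :
    ∀ (k : Nat) (v : Int) (rest : List Int), k + chunk.length ≤ bpl →
      packLoopA bpb bpl k (v :: rest) chunk = orChunk bpb k v chunk :: rest := by
  induction chunk with
  | nil => intro k v rest _; simp [packLoopA, orChunk]
  | cons x xs ih =>
      intro k v rest h
      have hk : k < bpl := by simp at h; omega
      simp only [packLoopA, orChunk, Nat.div_eq_of_lt hk, Nat.mod_eq_of_lt hk,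
        List.getD_cons_zero, List.set_cons_zero]
      exact ih (k + 1) _ rest (by simp at h ⊢; omega)

-- once the loop index has moved past a full long, the head cell is never touched again
theorem packLoopA_shift (bpb bpl : Nat) (hb : 0 < bpl) (d : List Int) :
    ∀ (i : Nat) (v : Int) (p : List Int),
      packLoopA bpb bpl (bpl + i) (v :: p) d = v :: packLoopA bpb bpl i p d := by
  induction d with
  | nil => intro i v p; simp [packLoopA]
  | cons x xs ih =>
      intro i v p
      have hdiv : (bpl + i) / bpl = i / bpl + 1 := by
        rw [Nat.add_comm, Nat.add_div_right _ hb]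
      have hmod : (bpl + i) % bpl = i % bpl := Nat.add_mod_left bpl i
      simp only [packLoopA, hdiv, hmod, List.getD_cons_succ, List.set_cons_succ]
      have : bpl + i + 1 = bpl + (i + 1) := by omega
      rw [this, ih]

-- unfolding equations for the well-founded chunk recursion
theorem chunksB_nil (bpb bpl : Nat) : chunksB bpb bpl [] = [] := by
  rw [chunksB]

theorem chunksB_cons (bpb bpl : Nat) (x : Int) (xs : List Int) :
    chunksB bpb bpl (x :: xs)
      = (if orChunk bpb 0 0 (x :: xs.take (bpl - 1)) ≥ 2 ^ 63 then
            orChunk bpb 0 0 (x :: xs.take (bpl - 1)) - 2 ^ 64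
          else orChunk bpb 0 0 (x :: xs.take (bpl - 1)))
        :: chunksB bpb bpl (xs.drop (bpl - 1)) := by
  rw [chunksB]

-- main invariant: A's scatter into m zeroed longs, then fixup, equals B's chunk list plus padding
theorem main_inv (bpb bpl : Nat) (hb : 0 < bpl) :
    ∀ (n : Nat) (data : List Int), data.length ≤ n → ∀ (m : Nat), data.length ≤ m * bpl →
      (packLoopA bpb bpl 0 (List.replicate m 0) data).map
          (fun v => if v ≥ 2 ^ 63 then v - 2 ^ 64 else v)
        = chunksB bpb bpl data
            ++ List.replicate (m - (chunksB bpb bpl data).length) (0 : Int) := by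
  intro n
  induction n with
  | zero =>
      intro data hn m _
      have : data = [] := List.eq_nil_of_length_eq_zero (by omega)
      subst this
      simp [packLoopA, chunksB_nil]
  | succ n ih =>
      intro data hn m hlen
      match data with
      | [] => simp [packLoopA, chunksB_nil]
      | x :: xs =>
        have hlen1 : xs.length + 1 ≤ m * bpl := by simpa using hlen
        have hm : 0 < m := by
          rcases Nat.eq_zero_or_pos m with h0 | h
          · rw [h0] at hlen1; simp at hlen1
          · exact h
        obtain ⟨m', rfl⟩ : ∃ m', m = m' + 1 := ⟨m - 1, by omega⟩
        rw [List.replicate_succ]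
        by_cases hrest : xs.drop (bpl - 1) = []
        · -- last (possibly short) chunk: the whole remaining data fits in one long
          have hxs : xs.length ≤ bpl - 1 := by
            have := congrArg List.length hrest
            simp at this
            omega
          have htake : xs.take (bpl - 1) = xs := List.take_of_length_le hxs
          rw [packLoopA_chunk bpb bpl _ 0 0 _ (by simp; omega)]
          rw [chunksB_cons, hrest, chunksB_nil, htake]
          simp
        · -- full chunk of bpl blocks, then recurse on the rest
          have hxs : bpl - 1 ≤ xs.length := by
            by_contra h
            exact hrest (List.drop_eq_nil_of_le (by omega))
          have hsplit : x :: xs = (x :: xs.take (bpl - 1)) ++ xs.drop (bpl - 1) := by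
            simp
          conv_lhs => rw [hsplit, packLoopA_append]
          rw [packLoopA_chunk bpb bpl _ 0 0 _ (by simp; omega)]
          have hclen : (x :: xs.take (bpl - 1)).length = bpl := by simp; omega
          rw [hclen, show 0 + bpl = bpl + 0 from by omega,
            packLoopA_shift bpb bpl hb _ 0]
          have hn' : (xs.drop (bpl - 1)).length ≤ n := by
            simp at hn ⊢
            omega
          have hlen' : (xs.drop (bpl - 1)).length ≤ m' * bpl := by
            have h1 : (m' + 1) * bpl = m' * bpl + bpl := by ring
            simp
            omega
          simp only [List.map_cons, ih (xs.drop (bpl - 1)) hn' m' hlen']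
          rw [chunksB_cons]
          simp [List.length_cons]

-- bits_per_block ≤ 32 on the domain, hence blocks_per_long ≥ 2 > 0
theorem bpl_pos (palette_size : Int)
    (h : pvDomInt palette_size = true) :
    0 < 64 / max 4 (PySem.Int.bitLength (palette_size - 1)) := by
  simp [pvDomInt] at h
  have habs : (palette_size - 1).natAbs < 2 ^ 32 := by
    have : (palette_size - 1).natAbs ≤ 2 ^ 31 + 1 := by omega
    omega
  have hbl : PySem.Int.bitLength (palette_size - 1) ≤ 32 := by
    by_contra hgt
    have h33 : 33 ≤ PySem.Int.bitLength (palette_size - 1) := by omega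
    have hne : palette_size - 1 ≠ 0 := by
      intro h0
      rw [h0] at h33
      simp [PySem.Int.bitLength_zero] at h33
    have := PySem.Int.two_pow_bitLength_le (palette_size - 1) hne
    have h2 : 2 ^ 32 ≤ 2 ^ (PySem.Int.bitLength (palette_size - 1) - 1) :=
      Nat.pow_le_pow_right (by norm_num) (by omega)
    omega
  have h4 : 0 < max 4 (PySem.Int.bitLength (palette_size - 1)) := by omega
  have hle : max 4 (PySem.Int.bitLength (palette_size - 1)) ≤ 64 := by omega
  exact Nat.div_pos hle h4

-- ===== VERDICT (by name: the statement is the Claim_ definition above) =====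
theorem pack_data_array_spec : Claim_equal_pack_data_array := by
  intro data palette_size hdom hpre
  unfold Spec_pack_data_array pack_data_array pack_data_array_alt
  have hdom' : pvDomInt palette_size = true := by
    unfold Dom_pack_data_array at hdom
    simp at hdom
    exact hdom.2
  have hb := bpl_pos palette_size hdom'
  unfold Pre_pack_data_array at hpre
  exact main_inv _ _ hb data.length data le_rfl _ hpre
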